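-- pv_equiv track=rewrite | github.com/pirl-unc/presto | data/mhc_index.py | _candidate_tokens
-- ===== SOURCE A (Python) =====
-- from typing import Dict, Iterable, Iterator, List, Optional, Tuple
--
-- def _candidate_tokens(header: str) -> List[str]:
--     cleaned = header.replace("|", " ").replace(";", " ")
--     tokens = [t.strip() for t in cleaned.split() if t.strip()]
--     if not tokens:
--         return []
--     scored = []
--     for tok in tokens:
--         score = 0
--         if "*" in tok:
--             score += 3
--         if tok.upper().startswith("HLA-"):
--             score += 2
--         if tok.upper().startswith("H-2"):
--             score += 2
--         if tok.upper().startswith("MAMU"):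
--             score += 2
--         if ":" in tok:
--             score += 1
--         scored.append((score, tok))
--     scored.sort(key=lambda x: x[0], reverse=True)
--     return [tok for _, tok in scored]
-- ===== SOURCE B (Python) =====
-- def _score(tok: str) -> int:
--     up = tok.upper()
--     return ((3 if "*" in tok else 0)
--             + (2 if up.startswith("HLA-") else 0)
--             + (2 if up.startswith("H-2") else 0)
--             + (2 if up.startswith("MAMU") else 0)
--             + (1 if ":" in tok else 0))
--
-- def _candidate_tokens(header: str):
--     cleaned = header.replace("|", " ").replace(";", " ")
--     tokens = [t.strip() for t in cleaned.split() if t.strip()]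
--     buckets = {}
--     for tok in tokens:
--         buckets.setdefault(_score(tok), []).append(tok)
--     out = []
--     for s in sorted(buckets, reverse=True):
--         out.extend(buckets[s])
--     return out
-- ===== Notes on version B (the rewrite author's own statement) =====
-- stated objective: alternative
-- what changed: Replaces building (score, token) pairs and a comparison sort with reverse=True by a stable bucket (counting) sort: tokens are appended to a per-score dict bucket in input order and the output is drained from the highest score down.
import Mathlib
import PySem

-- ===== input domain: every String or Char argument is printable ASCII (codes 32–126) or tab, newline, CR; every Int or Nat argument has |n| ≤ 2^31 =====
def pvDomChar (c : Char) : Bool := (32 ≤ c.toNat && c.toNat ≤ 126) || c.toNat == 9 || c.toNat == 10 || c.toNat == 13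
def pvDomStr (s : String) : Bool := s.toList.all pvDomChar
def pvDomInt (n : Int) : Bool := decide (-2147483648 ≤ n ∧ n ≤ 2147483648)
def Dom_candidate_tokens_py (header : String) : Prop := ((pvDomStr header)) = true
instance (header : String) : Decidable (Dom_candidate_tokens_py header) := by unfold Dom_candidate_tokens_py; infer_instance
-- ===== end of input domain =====

-- B replaces the comparison sort of (score, token) pairs by a stable bucket (counting) sort:
-- tokens are appended to a dict bucket per score and drained from the highest score down.

-- ===== PORT A =====
def candidate_tokens_py (header : String) : List String :=
  let cleaned := PySem.Str.replace (PySem.Str.replace header "|" " ") ";" " "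
  let tokens := ((PySem.Str.split₀ cleaned).filter
      (fun t => !(PySem.Str.strip t == ""))).map PySem.Str.strip
  if tokens = [] then []
  else
    let scored := tokens.foldl (fun acc tok =>
      let score : Int := 0
      let score := if PySem.Str.isIn "*" tok then score + 3 else score
      let score := if PySem.Str.startswith (PySem.Str.upper tok) "HLA-" then score + 2 else score
      let score := if PySem.Str.startswith (PySem.Str.upper tok) "H-2" then score + 2 else score
      let score := if PySem.Str.startswith (PySem.Str.upper tok) "MAMU" then score + 2 else score
      let score := if PySem.Str.isIn ":" tok then score + 1 else score
      acc ++ [(score, tok)]) []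
    (PySem.List.sorted scored (fun x => x.1) true).map (fun x => x.2)

-- ===== PORT B =====
def pvScoreB (tok : String) : Int :=
  let up := PySem.Str.upper tok
  (if PySem.Str.isIn "*" tok then 3 else 0)
  + (if PySem.Str.startswith up "HLA-" then 2 else 0)
  + (if PySem.Str.startswith up "H-2" then 2 else 0)
  + (if PySem.Str.startswith up "MAMU" then 2 else 0)
  + (if PySem.Str.isIn ":" tok then 1 else 0)

def candidate_tokens_py_alt (header : String) : List String :=
  let cleaned := PySem.Str.replace (PySem.Str.replace header "|" " ") ";" " "
  let tokens := ((PySem.Str.split₀ cleaned).filter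
      (fun t => !(PySem.Str.strip t == ""))).map PySem.Str.strip
  let buckets : PySem.Dict Int (List String) :=
    tokens.foldl (fun d tok => d.modify (pvScoreB tok) [] (fun v => v ++ [tok])) PySem.Dict.empty
  (PySem.List.sorted buckets.keys (fun x => x) true).foldl
    (fun out s => out ++ buckets.getD s []) []

-- ===== PRECONDITION & SPEC =====
def Spec_candidate_tokens_py (header : String) (out : List String) : Prop := out = candidate_tokens_py_alt header
instance (header : String) (out : List String) : Decidable (Spec_candidate_tokens_py header out) := by unfold Spec_candidate_tokens_py; infer_instance

-- ===== CLAIM (what is proved, stated in full; the proofs are below) =====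
def Claim_equal_candidate_tokens_py : Prop := ∀ (header : String), Dom_candidate_tokens_py header → Spec_candidate_tokens_py header (candidate_tokens_py header)

-- ===== LEMMAS AND PROOFS =====

-- skipping a block of elements x is not inserted before
lemma insertBy_skip {α : Type} (before : α → α → Bool) (x : α) (b rest : List α)
    (h : ∀ y ∈ b, before x y = false) :
    PySem.List.insertBy before x (b ++ rest) = b ++ PySem.List.insertBy before x rest := by
  induction b with
  | nil => simp
  | cons y b ih =>
    have hy : before x y = false := h y (by simp)
    simp [PySem.List.insertBy, hy, ih (fun z hz => h z (by simp [hz]))]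

-- inserting one element into the flatten-of-buckets shape updates exactly its bucket
lemma insertBy_buckets {α : Type} (key : α → Int) (ss : List Int) (x : α) (xs : List α)
    (hss : ss.Pairwise (fun a b => b < a)) (hx : key x ∈ ss) :
    PySem.List.insertBy (fun a b => decide (key b < key a)) x
        ((ss.map (fun s => xs.filter (fun y => key y == s))).flatten)
      = (ss.map (fun s => (xs ++ [x]).filter (fun y => key y == s))).flatten := by
  induction ss with
  | nil => simp at hx
  | cons s ss ih =>
    have hlt : ∀ s' ∈ ss, s' < s := fun s' hs' => List.rel_of_pairwise_cons hss hs'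
    have hrest : ∀ y ∈ ((ss.map (fun s => xs.filter (fun y => key y == s))).flatten),
        key y < s := by
      intro y hy
      rcases List.mem_flatten.1 hy with ⟨l, hl, hyl⟩
      rcases List.mem_map.1 hl with ⟨s', hs', rfl⟩
      have hky : key y = s' := by simpa using (List.mem_filter.1 hyl).2
      rw [hky]; exact hlt s' hs'
    by_cases hxs : key x = s
    · have hskip : ∀ y ∈ xs.filter (fun y => key y == s), (fun a b => decide (key b < key a)) x y = false := by
        intro y hy
        have : key y = s := by simpa using (List.mem_filter.1 hy).2
        simp [this, hxs]
      rw [List.map_cons, List.flatten_cons, insertBy_skip _ _ _ _ hskip]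
      have hins : PySem.List.insertBy (fun a b => decide (key b < key a)) x
          ((ss.map (fun s => xs.filter (fun y => key y == s))).flatten)
          = x :: (ss.map (fun s => xs.filter (fun y => key y == s))).flatten := by
        cases hfl : (ss.map (fun s => xs.filter (fun y => key y == s))).flatten with
        | nil => simp [PySem.List.insertBy]
        | cons z zs =>
          have hz : key z < key x := by
            rw [hxs]; exact hrest z (hfl ▸ List.mem_cons_self)
          simp [PySem.List.insertBy, hz]
      rw [hins, List.map_cons, List.flatten_cons]
      have hb : (xs ++ [x]).filter (fun y => key y == s) = xs.filter (fun y => key y == s) ++ [x] := by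
        simp [List.filter_append, hxs]
      have hss' : ∀ s' ∈ ss, (xs ++ [x]).filter (fun y => key y == s')
          = xs.filter (fun y => key y == s') := by
        intro s' hs'
        have hne : key x ≠ s' := by
          intro h
          have := hlt s' hs'
          omega
        simp [List.filter_append, hne]
      have hmapeq : ss.map (fun s' => (xs ++ [x]).filter (fun y => key y == s'))
          = ss.map (fun s' => xs.filter (fun y => key y == s')) :=
        List.map_congr_left hss'
      rw [hb, hmapeq]
      simp
    · have hx' : key x ∈ ss := by
        rcases List.mem_cons.1 hx with h | h
        · exact absurd h hxs
        · exact h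
      have hxlt : key x < s := hlt _ hx'
      have hskip : ∀ y ∈ xs.filter (fun y => key y == s), (fun a b => decide (key b < key a)) x y = false := by
        intro y hy
        have : key y = s := by simpa using (List.mem_filter.1 hy).2
        simp [this]
        omega
      rw [List.map_cons, List.flatten_cons, insertBy_skip _ _ _ _ hskip,
          ih (List.Pairwise.sublist (List.sublist_cons_self s ss) hss) hx']
      have hb : (xs ++ [x]).filter (fun y => key y == s) = xs.filter (fun y => key y == s) := by
        simp [List.filter_append, hxs]
      rw [List.map_cons, List.flatten_cons, hb]

-- the stable reverse sort by an Int key is the concatenation of the score buckets, drained high-to-low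
lemma sorted_rev_eq_flatten_buckets {α : Type} (key : α → Int) (ss : List Int) (xs : List α)
    (hss : ss.Pairwise (fun a b => b < a)) (hmem : ∀ x ∈ xs, key x ∈ ss) :
    PySem.List.sorted xs key true = (ss.map (fun s => xs.filter (fun y => key y == s))).flatten := by
  rw [PySem.List.sorted_rev_eq_foldl_insertBy]
  induction xs using List.reverseRecOn with
  | nil => simp
  | append_singleton l x ih =>
    rw [List.foldl_append, List.foldl_cons, List.foldl_nil,
        ih (fun y hy => hmem y (by simp [hy])),
        insertBy_buckets key ss x l hss (hmem x (by simp))]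

lemma main_eq (tokens : List String) :
    (if tokens = [] then []
     else
       let scored := tokens.foldl (fun acc tok =>
         let score : Int := 0
         let score := if PySem.Str.isIn "*" tok then score + 3 else score
         let score := if PySem.Str.startswith (PySem.Str.upper tok) "HLA-" then score + 2 else score
         let score := if PySem.Str.startswith (PySem.Str.upper tok) "H-2" then score + 2 else score
         let score := if PySem.Str.startswith (PySem.Str.upper tok) "MAMU" then score + 2 else score
         let score := if PySem.Str.isIn ":" tok then score + 1 else score
         acc ++ [(score, tok)]) []
       (PySem.List.sorted scored (fun x => x.1) true).map (fun x => x.2))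
    = (let buckets : PySem.Dict Int (List String) :=
         tokens.foldl (fun d tok => d.modify (pvScoreB tok) [] (fun v => v ++ [tok])) PySem.Dict.empty
       (PySem.List.sorted buckets.keys (fun x => x) true).foldl
         (fun out s => out ++ buckets.getD s []) []) := by
  by_cases h0 : tokens = []
  · subst h0
    rfl
  -- A's scoring lambda is (pvScoreB tok, tok)
  have hsc : (fun (acc : List (Int × String)) (tok : String) =>
      let score : Int := 0
      let score := if PySem.Str.isIn "*" tok then score + 3 else score
      let score := if PySem.Str.startswith (PySem.Str.upper tok) "HLA-" then score + 2 else score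
      let score := if PySem.Str.startswith (PySem.Str.upper tok) "H-2" then score + 2 else score
      let score := if PySem.Str.startswith (PySem.Str.upper tok) "MAMU" then score + 2 else score
      let score := if PySem.Str.isIn ":" tok then score + 1 else score
      acc ++ [(score, tok)])
      = fun acc tok => acc ++ [(pvScoreB tok, tok)] := by
    funext acc tok
    simp only [pvScoreB]
    split_ifs <;> norm_num
  rw [hsc]
  -- B's bucket fold as a fold over (score, token) pairs
  have hfold : tokens.foldl (fun d tok => d.modify (pvScoreB tok) [] (fun v => v ++ [tok]))
        (PySem.Dict.empty : PySem.Dict Int (List String))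
      = (tokens.map (fun t => (pvScoreB t, t))).foldl
          (fun d p => d.modify p.1 [] (fun v => v ++ [p.2])) PySem.Dict.empty := by
    rw [List.foldl_map]
  set scored := tokens.map (fun t => (pvScoreB t, t)) with hscored
  set buckets := tokens.foldl (fun d tok => d.modify (pvScoreB tok) [] (fun v => v ++ [tok]))
      (PySem.Dict.empty : PySem.Dict Int (List String)) with hbdef
  -- the keys of the buckets dict: the distinct scores, in first-appearance order
  have hkeys : buckets.keys = PySem.Set.ofList (tokens.map pvScoreB) := by
    rw [hbdef, PySem.Dict.keys_foldl_modify_key tokens pvScoreB [] (fun _ tok => fun v => v ++ [tok])]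
    simp [PySem.Set.update, PySem.Set.ofList, PySem.Dict.keys, PySem.Dict.empty, PySem.Set.empty]
  set ks := PySem.List.sorted buckets.keys (fun x => x) true with hks
  have hksnd : ks.Nodup := by
    rw [hks, hkeys]
    exact (PySem.List.sorted_perm _ _ _).symm.nodup (PySem.Set.nodup_ofList _)
  have hkge : ks.Pairwise (fun a b : Int => b ≤ a) := by
    have := PySem.List.sorted_pairwise_rev buckets.keys (fun x : Int => x)
    simpa [hks] using this
  have hkgt : ks.Pairwise (fun a b : Int => b < a) := by
    have := hkge.and hksnd
    exact this.imp (fun {a b} h => lt_of_le_of_ne h.1 (Ne.symm h.2))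
  have hmem : ∀ p ∈ scored, p.1 ∈ ks := by
    intro p hp
    rcases List.mem_map.1 hp with ⟨t, ht, rfl⟩
    rw [hks, PySem.List.mem_sorted, hkeys, PySem.Set.mem_ofList]
    exact List.mem_map.2 ⟨t, ht, rfl⟩
  -- A's left fold builds list-of-pairs = scored
  have hA : tokens.foldl (fun acc tok => acc ++ [(pvScoreB tok, tok)])
      ([] : List (Int × String)) = scored := by
    rw [hscored]
    simpa using PySem.List.foldl_append_singleton_eq_map (fun t => (pvScoreB t, t)) tokens []
  -- each bucket's contents
  have hbucket : ∀ s : Int, buckets.getD s []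
      = (scored.filter (fun p => p.1 == s)).map (fun p => p.2) := by
    intro s
    rw [hfold]
    simpa [PySem.Dict.getD, PySem.Dict.empty] using
      PySem.Dict.getD_foldl_modify_append scored
        (PySem.Dict.empty : PySem.Dict Int (List String)) s
  simp only [h0, if_false, hA]
  rw [sorted_rev_eq_flatten_buckets (fun p => p.1) ks scored hkgt hmem]
  rw [List.map_flatten, List.map_map]
  rw [PySem.List.foldl_append_eq_flatMap (fun s => buckets.getD s []) ks [],
      List.nil_append, List.flatMap_def]
  congr 1
  refine List.map_congr_left ?_
  intro s _
  rw [hbucket s]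
  rfl

-- ===== VERDICT (by name: the statement is the Claim_ definition above) =====
theorem candidate_tokens_py_spec : Claim_equal_candidate_tokens_py := by
  intro header _
  unfold Spec_candidate_tokens_py candidate_tokens_py candidate_tokens_py_alt
  exact main_eq _
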